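-- pv_equiv track=rewrite | github.com/heejuneee/Coding-Test | Level1(ID)/Level1(ID).py | solution
-- ===== SOURCE A (Python) =====
-- def solution(new_id):
--     answer = ''
--     min = 3
--     max = 15
--     #1단계
--     new_id = new_id.lower()
--     re_id = ''
--     #2단계
--     for i in new_id:
--         #isalnum()- 문자열에 숫자 또는 알파벳이 있을 경우 True 반환
--         if i.isalnum():
--             re_id+=i
--         elif i=='-':
--             re_id+=i
--         elif  i=='_':
--             re_id+=i
--         elif  i=='.':
--             re_id+=i
--     #3단계
--     #문자열 치환 함수 replace 사용
--     while(True):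
--         if '..' in re_id:
--                 re_id=re_id.replace('..','.')
--         else:
--             break
--     #4단계
--     #문자열 앞 뒤에 '.' 제거
--     re_id=re_id.strip('.')
--     #5단계
--     if re_id == "":
--         for i in range(min):
--             re_id+='a'
--     #6단계
--     else:
--         if len(re_id) > max:
--             re_id=re_id[0:max]
--             if re_id[max-1] == '.':
--                 re_id=re_id.rstrip('.')
--         elif len(re_id) < min:
--             for i in range(min-len(re_id)):
--                 re_id+=re_id[-1]
--     answer = re_id
--     return answer
-- ===== SOURCE B (Python) =====
-- def solution(new_id):
--     out = []
--     for ch in new_id.lower():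
--         if ch.isalnum() or ch in '-_':
--             out.append(ch)
--         elif ch == '.':
--             if out and out[-1] == '.':
--                 continue
--             out.append(ch)
--     s = ''.join(out).strip('.')
--     if not s:
--         return 'aaa'
--     if len(s) > 15:
--         s = s[:15].rstrip('.')
--     elif len(s) < 3:
--         s = s + s[-1] * (3 - len(s))
--     return s
-- ===== Notes on version B (the rewrite author's own statement) =====
-- stated objective: alternative
-- what changed: B sanitizes in one forward pass that filters characters and collapses consecutive dots on the fly, instead of A's replace('..','.')-until-stable loop and conditional rstrip after truncation.
import Mathlib
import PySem

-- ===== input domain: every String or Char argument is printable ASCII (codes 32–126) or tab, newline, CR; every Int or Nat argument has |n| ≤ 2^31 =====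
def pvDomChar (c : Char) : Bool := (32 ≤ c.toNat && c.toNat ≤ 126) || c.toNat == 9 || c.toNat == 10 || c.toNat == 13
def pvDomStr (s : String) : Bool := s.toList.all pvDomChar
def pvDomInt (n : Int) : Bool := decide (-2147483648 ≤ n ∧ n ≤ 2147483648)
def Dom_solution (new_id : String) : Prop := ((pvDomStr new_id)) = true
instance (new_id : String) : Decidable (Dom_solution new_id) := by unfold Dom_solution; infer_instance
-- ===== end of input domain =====

-- B replaces A's replace('..','.')-until-stable loop by a single forward pass that
-- filters characters and collapses consecutive dots on the fly (alternative algorithm;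
-- no speed claim). Both programs are total; proved equal on all inputs.

-- ===== PORT A =====

-- hand port of Python's s.rstrip('.') (rstrip with a chars argument): drop trailing '.' characters; exact
def pyRstripDots (s : List Char) : List Char := (s.reverse.dropWhile (· == '.')).reverse

-- A's `while True: if '..' in re_id: re_id = re_id.replace('..','.') else: break`,
-- run with fuel = length: each replace of '..' by '.' strictly shortens the string
-- (lemma repDD_length_lt below), so the fuel is never exhausted and this is exact.
def solutionLoop : Nat → List Char → List Char
  | 0, s => s
  | fuel+1, s =>
    if PySem.Chars.isIn ['.', '.'] s then
      solutionLoop fuel (PySem.Chars.replace s ['.', '.'] ['.'])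
    else s

def solution (new_id : String) : String :=
  -- 1단계: new_id = new_id.lower()
  let cs := PySem.Chars.lower new_id.toList
  -- 2단계: character filter loop building re_id
  let re₁ := cs.foldl (fun acc i =>
      if PySem.Chars.isalnum i then acc ++ [i]
      else if i = '-' then acc ++ [i]
      else if i = '_' then acc ++ [i]
      else if i = '.' then acc ++ [i]
      else acc) []
  -- 3단계: replace '..' by '.' until stable
  let re₂ := solutionLoop re₁.length re₁
  -- 4단계: re_id.strip('.')
  let re₃ := PySem.Chars.stripChars re₂ ['.']
  -- 5단계 / 6단계
  let re₄ :=
    if re₃ = [] then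
      (PySem.List.pyRange 0 3 1).foldl (fun acc _ => acc ++ ['a']) re₃
    else if re₃.length > 15 then
      let t := PySem.List.slice re₃ (some 0) (some 15)
      if PySem.List.pyGet? t (15 - 1) = some '.' then pyRstripDots t else t
    else if re₃.length < 3 then
      (PySem.List.pyRange 0 (3 - (re₃.length : Int)) 1).foldl
        (fun acc _ => match PySem.List.pyGet? acc (-1) with   -- re_id[-1]; never none here (re₃ ≠ [])
          | some c => acc ++ [c]
          | none => acc) re₃
    else re₃
  String.mk re₄

-- ===== PORT B =====

def solution_alt (new_id : String) : String :=
  let out := (PySem.Chars.lower new_id.toList).foldl (fun acc ch =>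
      if PySem.Chars.isalnum ch ∨ ch = '-' ∨ ch = '_' then acc ++ [ch]
      else if ch = '.' then
        -- `if out and out[-1] == '.': continue` (getLast? = some '.' ⇔ out nonempty with last '.')
        (if acc.getLast? = some '.' then acc else acc ++ [ch])
      else acc) []
  let s := PySem.Chars.stripChars out ['.']   -- ''.join(out).strip('.')
  if s = [] then "aaa"
  else if s.length > 15 then String.mk (pyRstripDots (PySem.List.slice s none (some 15)))
  else if s.length < 3 then
    String.mk (s ++ (match PySem.List.pyGet? s (-1) with   -- s[-1] * (3 - len(s)); s ≠ []
      | some c => List.replicate (3 - s.length) c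
      | none => []))
  else String.mk s

-- ===== PRECONDITION & SPEC =====
def Spec_solution (new_id : String) (out : String) : Prop := out = solution_alt new_id
instance (new_id : String) (out : String) : Decidable (Spec_solution new_id out) := by unfold Spec_solution; infer_instance

-- ===== CLAIM (what is proved, stated in full; the proofs are below) =====
def Claim_equal_solution : Prop := ∀ (new_id : String), Dom_solution new_id → Spec_solution new_id (solution new_id)

-- ===== LEMMAS AND PROOFS =====

-- the set of characters both programs keep
def keepC (c : Char) : Bool := PySem.Chars.isalnum c || c == '-' || c == '_' || c == '.'

-- one Python replace('..','.') pass, as a clean recursion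
def repDD : List Char → List Char
  | [] => []
  | [c] => [c]
  | a :: b :: t => if a = '.' ∧ b = '.' then '.' :: repDD t else a :: repDD (b :: t)

-- collapse runs of dots, tracking whether the previously emitted char is a dot
def CA : Bool → List Char → List Char
  | _, [] => []
  | f, c :: t => if c = '.' then (if f then CA true t else '.' :: CA true t) else c :: CA false t

theorem CA_dot_true (t : List Char) : CA true ('.' :: t) = CA true t := by simp [CA]

theorem CA_dot_false (t : List Char) : CA false ('.' :: t) = '.' :: CA true t := by simp [CA]

theorem CA_ne (f : Bool) (c : Char) (t : List Char) (hc : c ≠ '.') :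
    CA f (c :: t) = c :: CA false t := by cases f <;> simp [CA, hc]

theorem repDD_dd (t : List Char) : repDD ('.' :: '.' :: t) = '.' :: repDD t := by
  simp [repDD]

theorem repDD_cons (a b : Char) (t : List Char) (hab : ¬ (a = '.' ∧ b = '.')) :
    repDD (a :: b :: t) = a :: repDD (b :: t) := by simp [repDD, hab]

theorem repDD_length_le (s : List Char) : (repDD s).length ≤ s.length := by
  induction s using repDD.induct with
  | case1 => simp [repDD]
  | case2 c => simp [repDD]
  | case3 a b t h ih => simp only [repDD, if_pos h]; simp; omega
  | case4 a b t h ih => simp only [repDD, if_neg h]; simp at ih ⊢; omega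

theorem repDD_length_lt (s : List Char) (h : ['.', '.'] <:+: s) :
    (repDD s).length < s.length := by
  induction s using repDD.induct with
  | case1 => simp at h
  | case2 c =>
      rw [List.infix_iff_prefix_suffix] at h
      obtain ⟨t, ht, hs⟩ := h
      have := ht.length_le; have := hs.length_le; simp at *; omega
  | case3 a b t hab ih =>
      simp only [repDD, if_pos hab]
      have := repDD_length_le t; simp; omega
  | case4 a b t hab ih =>
      simp only [repDD, if_neg hab]
      have hbt : ['.', '.'] <:+: b :: t := by
        rcases (List.infix_cons_iff).1 h with hp | hi
        · exfalso; rcases hp with ⟨u, hu⟩; simp at hu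
          exact hab ⟨hu.1.symm, hu.2.1.symm⟩
        · exact hi
      have := ih hbt; simp at *; omega

theorem CA_repDD (s : List Char) (f : Bool) : CA f (repDD s) = CA f s := by
  induction s using repDD.induct generalizing f with
  | case1 => rfl
  | case2 c => rfl
  | case3 a b t hab ih =>
      obtain ⟨h1, h2⟩ := hab; subst h1; subst h2
      rw [repDD_dd]
      cases f with
      | true => rw [CA_dot_true, CA_dot_true, CA_dot_true, ih true]
      | false => rw [CA_dot_false, CA_dot_false, CA_dot_true, ih true]
  | case4 a b t hab ih =>
      rw [repDD_cons a b t hab]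
      by_cases ha : a = '.'
      · subst ha
        cases f with
        | true => rw [CA_dot_true, CA_dot_true, ih true]
        | false => rw [CA_dot_false, CA_dot_false, ih true]
      · rw [CA_ne f a _ ha, CA_ne f a _ ha, ih false]

theorem CA_of_noDD (s : List Char) (h : ¬ ['.', '.'] <:+: s) :
    (s.head? ≠ some '.' → CA true s = s) ∧ CA false s = s := by
  induction s with
  | nil => simp [CA]
  | cons c t ih =>
      have hti : ¬ ['.', '.'] <:+: t := fun hi => h ((List.infix_cons_iff).2 (Or.inr hi))
      obtain ⟨ih1, ih2⟩ := ih hti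
      by_cases hc : c = '.'
      · subst hc
        have hth : t.head? ≠ some '.' := by
          intro hh
          cases t with
          | nil => simp at hh
          | cons d u =>
              simp at hh; subst hh
              exact h (show ['.', '.'] <+: '.' :: '.' :: u from ⟨u, rfl⟩).isInfix
        refine ⟨fun hh => by simp at hh, ?_⟩
        rw [CA_dot_false, ih1 hth]
      · have he := CA_ne (c := c) (t := t) (hc := hc)
        exact ⟨fun _ => by rw [he true, ih2], by rw [he false, ih2]⟩

theorem replace_go_eq (fuel : Nat) (l acc : List Char) (h : l.length ≤ fuel) :
    PySem.Chars.replace.go ['.', '.'] ['.'] fuel l acc = acc.reverse ++ repDD l := by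
  induction fuel generalizing l acc with
  | zero =>
      have : l = [] := by cases l <;> simp_all
      subst this
      simp [PySem.Chars.replace.go, repDD]
  | succ n ih =>
      match l with
      | [] => simp [PySem.Chars.replace.go, repDD]
      | [c] =>
          rw [PySem.Chars.replace.go]
          have hp : List.isPrefixOf ['.', '.'] [c] = false := by
            simp [List.isPrefixOf]
          rw [if_neg (by simp [hp])]
          rw [ih [] (c :: acc) (by simp)]
          simp [repDD]
      | a :: b :: t =>
          rw [PySem.Chars.replace.go]
          by_cases hab : a = '.' ∧ b = '.'
          · obtain ⟨h1, h2⟩ := hab; subst h1; subst h2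
            rw [if_pos (by simp [List.isPrefixOf])]
            simp only [List.length_cons] at h
            rw [show List.drop (['.', '.'] : List Char).length ('.' :: '.' :: t) = t by simp]
            rw [ih t _ (by omega)]
            simp [repDD]
          · have hp : List.isPrefixOf ['.', '.'] (a :: b :: t) = false := by
              simp [List.isPrefixOf]
              intro h1 h2; exact hab ⟨h1.symm, h2.symm⟩
            rw [if_neg (by simp [hp])]
            simp only [List.length_cons] at h
            rw [ih (b :: t) (a :: acc) (by simp; omega)]
            simp [repDD, hab]

theorem replace_eq_repDD (s : List Char) :
    PySem.Chars.replace s ['.', '.'] ['.'] = repDD s := by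
  rw [PySem.Chars.replace]
  rw [if_neg (by simp)]
  rw [replace_go_eq s.length s [] le_rfl]
  simp

theorem solutionLoop_eq (fuel : Nat) (s : List Char) (h : s.length ≤ fuel) :
    solutionLoop fuel s = CA false s := by
  induction fuel generalizing s with
  | zero =>
      have : s = [] := by cases s <;> simp_all
      subst this; rfl
  | succ n ih =>
      rw [solutionLoop]
      by_cases hin : PySem.Chars.isIn ['.', '.'] s = true
      · rw [if_pos hin, replace_eq_repDD]
        have hinf := (PySem.Chars.isIn_iff_infix _ _).1 hin
        have hlt := repDD_length_lt s hinf
        rw [ih _ (by omega), CA_repDD]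
      · rw [if_neg (by simpa using hin)]
        have hninf := (PySem.Chars.isIn_eq_false_iff _ _).1 (by simpa using hin)
        exact ((CA_of_noDD s hninf).2).symm

theorem foldA_eq (cs acc : List Char) :
    cs.foldl (fun acc i =>
      if PySem.Chars.isalnum i then acc ++ [i]
      else if i = '-' then acc ++ [i]
      else if i = '_' then acc ++ [i]
      else if i = '.' then acc ++ [i]
      else acc) acc = acc ++ cs.filter keepC := by
  induction cs generalizing acc with
  | nil => simp
  | cons c t ih =>
      rw [List.foldl_cons, ih, List.filter_cons]
      by_cases h1 : PySem.Chars.isalnum c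
      · simp [keepC, h1]
      · by_cases h2 : c = '-'
        · simp [keepC, h1, h2]
        · by_cases h3 : c = '_'
          · simp [keepC, h1, h2, h3]
          · by_cases h4 : c = '.'
            · simp [keepC, h1, h2, h3, h4]
            · simp [keepC, h1, h2, h3, h4]

theorem foldB_eq (cs acc : List Char) :
    cs.foldl (fun acc ch =>
      if PySem.Chars.isalnum ch ∨ ch = '-' ∨ ch = '_' then acc ++ [ch]
      else if ch = '.' then
        (if acc.getLast? = some '.' then acc else acc ++ [ch])
      else acc) acc = acc ++ CA (decide (acc.getLast? = some '.')) (cs.filter keepC) := by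
  induction cs generalizing acc with
  | nil => simp [CA]
  | cons c t ih =>
      rw [List.foldl_cons, List.filter_cons]
      by_cases hk1 : PySem.Chars.isalnum c ∨ c = '-' ∨ c = '_'
      · have hc : c ≠ '.' := by
          rintro rfl
          rcases hk1 with h | h | h
          · exact absurd h (by decide)
          · simp at h
          · simp at h
        have hkc : keepC c = true := by
          rcases hk1 with h | h | h <;> simp [keepC, h]
        rw [if_pos hk1, ih, if_pos hkc, CA_ne _ c _ hc]
        simp [List.getLast?_concat, hc]
      · rw [if_neg hk1]
        by_cases hc : c = '.'
        · subst hc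
          have hkc : keepC '.' = true := by simp [keepC]
          rw [if_pos rfl, if_pos hkc]
          by_cases hl : acc.getLast? = some '.'
          · rw [if_pos hl, ih, hl]
            simp [CA_dot_true]
          · rw [if_neg hl, ih]
            simp only [List.getLast?_concat]
            simp [hl, CA_dot_false]
        · have hkc : keepC c = false := by
            push_neg at hk1
            simp [keepC, hc, hk1.1, hk1.2.1, hk1.2.2]
          rw [if_neg hc, ih, if_neg (by simp [hkc])]

theorem foldB_nil_eq (cs : List Char) :
    cs.foldl (fun acc ch =>
      if PySem.Chars.isalnum ch ∨ ch = '-' ∨ ch = '_' then acc ++ [ch]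
      else if ch = '.' then
        (if acc.getLast? = some '.' then acc else acc ++ [ch])
      else acc) [] = CA false (cs.filter keepC) := by
  rw [foldB_eq]
  simp

-- A's padding loop `for i in range(k): re_id += re_id[-1]` appends the (unchanging) last char k times
theorem pad_eq (s : List Char) (h : s ≠ []) (k : Nat) :
    (PySem.List.pyRange 0 (k : Int) 1).foldl
      (fun acc _ => match PySem.List.pyGet? acc (-1) with
        | some c => acc ++ [c]
        | none => acc) s
    = s ++ (match PySem.List.pyGet? s (-1) with
        | some c => List.replicate k c
        | none => []) := by
  have hlast : PySem.List.pyGet? s (-1) = some (s.getLast h) := by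
    rw [PySem.List.pyGet?_neg_one, List.getLast?_eq_some_getLast h]
  rw [hlast]
  induction k with
  | zero => simp [PySem.List.pyRange_one_eq_nil]
  | succ n ih =>
      have hsucc : ((n + 1 : Nat) : Int) = ((n : Nat) : Int) + 1 := by push_cast; ring
      rw [hsucc, PySem.List.pyRange_one_succ_right (a := 0) (b := (n : Int)) (by positivity), List.foldl_append, ih]
      simp only [List.foldl_cons, List.foldl_nil]
      have hgl : PySem.List.pyGet? (s ++ List.replicate n (s.getLast h)) (-1)
          = some (s.getLast h) := by
        rw [PySem.List.pyGet?_neg_one]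
        cases n with
        | zero => simp [List.getLast?_eq_some_getLast h]
        | succ m =>
            rw [List.replicate_succ', ← List.append_assoc, List.getLast?_concat]
      rw [hgl]
      simp [List.replicate_succ', List.append_assoc]

theorem pyRstripDots_of_last_ne (l : List Char) (c : Char) (hl : l.getLast? = some c)
    (hc : c ≠ '.') : pyRstripDots l = l := by
  unfold pyRstripDots
  have hh : l.reverse.head? = some c := by simpa using hl
  match hr : l.reverse with
  | [] => simp [hr] at hh
  | d :: r =>
      rw [hr] at hh; simp at hh; subst hh
      rw [List.dropWhile_cons_of_neg (by simpa using hc)]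
      rw [← hr, List.reverse_reverse]

-- ===== VERDICT (by name: the statement is the Claim_ definition above) =====
theorem solution_spec : Claim_equal_solution := by
  unfold Claim_equal_solution Spec_solution
  intro new_id _
  unfold solution solution_alt
  simp only [foldA_eq, foldB_nil_eq, List.nil_append]
  rw [solutionLoop_eq _ _ le_rfl]
  set s := PySem.Chars.stripChars
      (CA false ((PySem.Chars.lower new_id.toList).filter keepC)) ['.'] with hs
  by_cases h0 : s = []
  · simp only [if_pos h0, h0]
    rfl
  · rw [if_neg h0, if_neg h0]
    by_cases h15 : s.length > 15
    · rw [if_pos h15, if_pos h15]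
      have hsl : PySem.List.slice s (some 0) (some 15) = PySem.List.slice s none (some 15) := by
        simp
      have htake : PySem.List.slice s none (some 15) = s.take 15 := by
        simpa using PySem.List.slice_to_natCast s 15
      rw [hsl, htake]
      have hlen : (s.take 15).length = 15 := by simp; omega
      by_cases hdot : PySem.List.pyGet? (s.take 15) (15 - 1) = some '.'
      · rw [if_pos hdot]
      · rw [if_neg hdot]
        have h14 : ((15 : Int) - 1) = ((14 : Nat) : Int) := by norm_num
        rw [h14, PySem.List.pyGet?_natCast] at hdot
        have hget : (s.take 15)[14]? = some ((s.take 15)[14]'(by omega)) := by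
          exact List.getElem?_eq_getElem (by omega)
        have hlast : (s.take 15).getLast? = some ((s.take 15)[14]'(by omega)) := by
          rw [List.getLast?_eq_getElem?]
          simp only [hlen]
          simpa using hget
        have hne : (s.take 15)[14]'(by omega) ≠ '.' := by
          intro hEq; exact hdot (by rw [hget, hEq])
        rw [pyRstripDots_of_last_ne _ _ hlast hne]
    · rw [if_neg h15, if_neg h15]
      by_cases h3 : s.length < 3
      · rw [if_pos h3, if_pos h3]
        have hcast : (3 - (s.length : Int)) = (((3 - s.length : Nat) : Int)) := by
          have hpos : 0 < s.length := List.length_pos_iff.2 h0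
          omega
        rw [hcast, pad_eq s h0]
      · rw [if_neg h3, if_neg h3]
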